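-- pv_equiv track=rewrite | github.com/genkinanodesu/competitive | AOJ/DPL/DPL_1_H.py | fullsearch
-- ===== SOURCE A (Python) =====
-- def fullsearch(S):
--     k = len(S)
--     ans = set()
--     for i in range(1<<k):
--         wa = 0
--         for j in range(k):
--             if 1 & (i >> j) :
--                 wa += S[j]
--         ans.add(wa)
--     return(sorted(list(ans)))
-- ===== SOURCE B (Python) =====
-- def fullsearch(S):
--     sums = {0}
--     for x in S:
--         sums |= {s + x for s in sums}
--     return sorted(sums)
-- ===== Notes on version B (the rewrite author's own statement) =====
-- stated objective: faster
-- what changed: Replaces the O(2^k * k) enumeration of all bitmasks with a one-pass subset-sum DP that keeps only the set of reachable sums, extending it by each element in turn.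
import Mathlib
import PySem

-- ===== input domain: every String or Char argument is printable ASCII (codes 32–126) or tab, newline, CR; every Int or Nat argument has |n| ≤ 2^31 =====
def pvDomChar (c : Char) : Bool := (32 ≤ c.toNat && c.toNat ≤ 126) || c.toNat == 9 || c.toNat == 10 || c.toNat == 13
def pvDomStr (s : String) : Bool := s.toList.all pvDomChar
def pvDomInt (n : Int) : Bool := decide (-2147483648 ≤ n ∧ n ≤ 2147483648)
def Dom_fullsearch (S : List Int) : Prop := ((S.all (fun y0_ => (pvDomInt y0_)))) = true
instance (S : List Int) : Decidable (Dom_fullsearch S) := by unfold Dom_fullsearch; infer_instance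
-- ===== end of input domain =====

-- B replaces A's O(2^k·k) bitmask enumeration by a one-pass subset-sum DP over the set of
-- reachable sums (objective: faster, asymptotic).

-- ===== PORT A =====
-- inner loop of A: wa = 0; for j in range(k): if 1 & (i >> j): wa += S[j]
-- (j comes from pyRange 0 len 1 so 0 ≤ j and j < len: 'j.toNat' is exact for the shift
--  and 'pyGetD … 0' is exact for S[j], which Python never takes out of range here)
def pvWaA (S : List Int) (i : Int) : Int :=
  (PySem.List.pyRange 0 (S.length : Int) 1).foldl
    (fun wa j => if PySem.Int.band 1 (i >>> j.toNat) ≠ 0 then wa + PySem.List.pyGetD S j 0 else wa) 0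

def fullsearch (S : List Int) : List Int :=
  let k := S.length
  let ans : PySem.Set Int :=
    (PySem.List.pyRange 0 ((1 : Int) <<< k) 1).foldl
      (fun ans i => PySem.Set.add ans (pvWaA S i)) PySem.Set.empty
  PySem.List.sorted ans (fun v => v) false

-- ===== PORT B =====
def fullsearch_alt (S : List Int) : List Int :=
  let sums : PySem.Set Int :=
    S.foldl (fun sums x => PySem.Set.union sums (sums.map (fun s => s + x)))
      (PySem.Set.ofList [0])
  PySem.List.sorted sums (fun v => v) false

-- ===== PRECONDITION & SPEC =====
def Spec_fullsearch (S : List Int) (out : List Int) : Prop := out = fullsearch_alt S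
instance (S : List Int) (out : List Int) : Decidable (Spec_fullsearch S out) := by unfold Spec_fullsearch; infer_instance

-- ===== CLAIM (what is proved, stated in full; the proofs are below) =====
def Claim_equal_fullsearch : Prop := ∀ (S : List Int), Dom_fullsearch S → Spec_fullsearch S (fullsearch S)

-- ===== LEMMAS AND PROOFS =====

-- the sum selected from S by the low bits of mask i (head = bit 0)
def pvMaskSum : List Int → Int → Int
  | [], _ => 0
  | x :: xs, i => (if PySem.Int.band 1 i ≠ 0 then x else 0) + pvMaskSum xs (i >>> (1 : Nat))

theorem pvBandOne (i : Int) (h : 0 ≤ i) : PySem.Int.band 1 i = i % 2 := by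
  rw [PySem.Int.band_of_nonneg (by norm_num) h]
  have : (1:Int).toNat &&& i.toNat = i.toNat % 2 := by
    show 1 &&& i.toNat = _
    rw [Nat.and_comm]; exact Nat.and_one_is_mod _
  rw [this]; omega

theorem pvShr1 (i : Int) : i >>> (1:Nat) = i / 2 := by
  rw [Int.shiftRight_eq_div_pow]; norm_num

theorem pvShrSucc (i : Int) (j : Nat) : i >>> (j+1) = (i >>> (1:Nat)) >>> j := by
  simp only [Int.shiftRight_eq_div_pow]
  push_cast
  rw [Int.ediv_ediv_of_nonneg (by norm_num)]
  congr 1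
  ring

theorem pvSumBits (S : List Int) : ∀ (i : Int),
    ((List.range S.length).map
      (fun j : Nat => if PySem.Int.band 1 (i >>> j) ≠ 0 then S.getD j 0 else 0)).sum
      = pvMaskSum S i := by
  induction S with
  | nil => intro i; simp [pvMaskSum]
  | cons x xs ih =>
    intro i
    rw [List.length_cons, List.range_succ_eq_map, List.map_cons, List.map_map, List.sum_cons]
    have hh : (i >>> (0:Nat)) = i := by simp [Int.shiftRight_eq_div_pow]
    have ht : ∀ j : Nat,
        ((fun j : Nat => if PySem.Int.band 1 (i >>> j) ≠ 0 then (x :: xs).getD j 0 else 0) ∘ Nat.succ) j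
          = (fun j : Nat => if PySem.Int.band 1 ((i >>> (1:Nat)) >>> j) ≠ 0 then xs.getD j 0 else 0) j := by
      intro j
      simp only [Function.comp, Nat.succ_eq_add_one, List.getD_cons_succ]
      rw [pvShrSucc i j]
    rw [List.map_congr_left (fun j _ => ht j), ih (i >>> (1:Nat))]
    simp [pvMaskSum, hh]

theorem pvWaA_eq_maskSum (S : List Int) (i : Int) :
    pvWaA S i = pvMaskSum S i := by
  unfold pvWaA
  rw [PySem.List.foldl_congr_mem _ _
      (fun wa j => wa + (if PySem.Int.band 1 (i >>> j.toNat) ≠ 0 then PySem.List.pyGetD S j 0 else 0)) 0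
      (by intro acc j _
          by_cases h : PySem.Int.band 1 (i >>> ↑j.toNat) ≠ 0
          · simp only [if_pos h]
          · simp only [if_neg h, add_zero])]
  rw [PySem.List.foldl_add, PySem.List.pyRange_zero_natCast, List.map_map, zero_add]
  rw [← pvSumBits S i]
  congr 1
  apply List.map_congr_left
  intro j hj
  simp only [Function.comp, Int.toNat_natCast, PySem.List.pyGetD_natCast, Int.shiftRight_natCast_right]

theorem pvMemA (S : List Int) (a : Int) :
    a ∈ (PySem.List.pyRange 0 ((1 : Int) <<< S.length) 1).foldl
        (fun ans i => PySem.Set.add ans (pvWaA S i)) PySem.Set.empty ↔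
      ∃ i : Int, 0 ≤ i ∧ i < 2 ^ S.length ∧ a = pvMaskSum S i := by
  rw [PySem.Set.mem_foldl_add]
  have h2 : (1:Int) <<< S.length = 2 ^ S.length := by simp [Int.shiftLeft_eq]
  constructor
  · rintro (h | ⟨i, hm, rfl⟩)
    · exact absurd h (by simp [PySem.Set.empty])
    · rw [PySem.List.mem_pyRange_one] at hm
      exact ⟨i, hm.1, h2 ▸ hm.2, (pvWaA_eq_maskSum S i).symm ▸ rfl⟩
  · rintro ⟨i, h0, hlt, rfl⟩
    refine Or.inr ⟨i, PySem.List.mem_pyRange_one.mpr ⟨h0, h2 ▸ hlt⟩, (pvWaA_eq_maskSum S i).symm⟩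

theorem pvMemB (S : List Int) : ∀ (acc : List Int) (a : Int),
    a ∈ S.foldl (fun sums x => PySem.Set.union sums (sums.map (fun s => s + x))) acc ↔
      ∃ b ∈ acc, ∃ i : Int, 0 ≤ i ∧ i < 2 ^ S.length ∧ a = b + pvMaskSum S i := by
  induction S with
  | nil =>
    intro acc a
    simp only [List.foldl_nil, List.length_nil, pow_zero]
    constructor
    · intro h; exact ⟨a, h, 0, le_refl 0, by norm_num, by simp [pvMaskSum]⟩
    · rintro ⟨b, hb, i, h0, h1, rfl⟩
      have : i = 0 := by omega
      simpa [this, pvMaskSum] using hb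
  | cons x xs ih =>
    intro acc a
    have hp : (2:Int) ^ (x :: xs).length = 2 * 2 ^ xs.length := by
      rw [List.length_cons, pow_succ]; ring
    rw [List.foldl_cons, ih]
    constructor
    · rintro ⟨b, hb, i, h0, hlt, rfl⟩
      rw [PySem.Set.mem_union] at hb
      rcases hb with hb | hb
      · refine ⟨b, hb, 2*i, by omega, by omega, ?_⟩
        simp only [pvMaskSum, pvBandOne _ (by omega : (0:Int) ≤ 2*i), pvShr1]
        have h1 : (2*i) % 2 = 0 := by omega
        have h2 : (2*i) / 2 = i := by omega
        simp [h1, h2]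
      · rcases List.mem_map.mp hb with ⟨c, hc, rfl⟩
        refine ⟨c, hc, 2*i+1, by omega, by omega, ?_⟩
        simp only [pvMaskSum, pvBandOne _ (by omega : (0:Int) ≤ 2*i+1), pvShr1]
        have h1 : (2*i+1) % 2 = 1 := by omega
        have h2 : (2*i+1) / 2 = i := by omega
        simp [h1, h2]; ring
    · rintro ⟨b, hb, i, h0, hlt, rfl⟩
      simp only [pvMaskSum, pvBandOne _ h0, pvShr1]
      by_cases he : i % 2 = 0
      · refine ⟨b, PySem.Set.mem_union _ _ _ |>.mpr (Or.inl hb), i/2, by omega, by omega, ?_⟩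
        simp [he]
      · refine ⟨b + x, PySem.Set.mem_union _ _ _ |>.mpr
          (Or.inr (List.mem_map.mpr ⟨b, hb, rfl⟩)), i/2, by omega, by omega, ?_⟩
        have h1 : i % 2 = 1 := by omega
        simp [h1]; ring

theorem pvNodupFoldlAdd {beta : Type} (l : List beta) (f : beta → Int) :
    ∀ (s : PySem.Set Int), s.Nodup → (l.foldl (fun s b => PySem.Set.add s (f b)) s).Nodup := by
  induction l with
  | nil => intro s h; exact h
  | cons x xs ih => intro s h; exact ih _ (PySem.Set.nodup_add s (f x) h)

theorem pvNodupA (S : List Int) :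
    ((PySem.List.pyRange 0 ((1 : Int) <<< S.length) 1).foldl
        (fun ans i => PySem.Set.add ans (pvWaA S i)) PySem.Set.empty).Nodup := by
  exact pvNodupFoldlAdd _ (pvWaA S) _ (by simp [PySem.Set.empty])

theorem pvNodupB (S : List Int) : ∀ (acc : List Int), acc.Nodup →
    (S.foldl (fun sums x => PySem.Set.union sums (sums.map (fun s => s + x))) acc).Nodup := by
  induction S with
  | nil => intro acc h; exact h
  | cons x xs ih => intro acc h; exact ih _ (PySem.Set.nodup_union _ _ h)

-- ===== VERDICT (by name: the statement is the Claim_ definition above) =====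
theorem fullsearch_spec : Claim_equal_fullsearch := by
  intro S _
  unfold Spec_fullsearch fullsearch fullsearch_alt
  apply PySem.List.sorted_eq_sorted_of_perm _ _ _ (fun a b h => h)
  refine (List.perm_ext_iff_of_nodup (pvNodupA S) (pvNodupB S [0] (by simp))).mpr ?_
  intro a
  rw [pvMemA, pvMemB]
  simp
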